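-- pv_equiv track=rewrite | github.com/dldbdud314/PS | programmers/최고의집합.py | solution
-- ===== SOURCE A (Python) =====
-- def solution(n, s):
--     if n > s:
--         return [-1]
--     ans = []
--     while True:
--         if n == 0:
--             break
--         p = s // n
--         ans.append(p)
--         s -= p
--         n -= 1
--     return ans
-- ===== SOURCE B (Python) =====
-- def solution(n, s):
--     if n > s:
--         return [-1]
--     if n == 0:
--         return []
--     q, r = divmod(s, n)
--     return [q] * (n - r) + [q + 1] * r
-- ===== Notes on version B (the rewrite author's own statement) =====
-- stated objective: simpler
-- what changed: Replaces the per-element greedy while-loop with a closed form: q, r = divmod(s, n) and the answer is [q]*(n-r) + [q+1]*r.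
import Mathlib
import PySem

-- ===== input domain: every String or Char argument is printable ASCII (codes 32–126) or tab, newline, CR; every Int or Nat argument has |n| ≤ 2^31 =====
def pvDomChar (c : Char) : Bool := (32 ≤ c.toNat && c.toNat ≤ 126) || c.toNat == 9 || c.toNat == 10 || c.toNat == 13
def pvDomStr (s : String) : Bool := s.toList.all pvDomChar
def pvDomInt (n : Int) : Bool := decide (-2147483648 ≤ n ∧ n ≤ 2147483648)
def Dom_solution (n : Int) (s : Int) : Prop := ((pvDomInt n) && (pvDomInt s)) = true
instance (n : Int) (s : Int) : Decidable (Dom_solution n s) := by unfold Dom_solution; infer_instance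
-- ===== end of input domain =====

-- B replaces A's per-element greedy while-loop with one divmod and two replicated blocks (simpler, one division instead of n).

-- ===== PORT A =====
-- A's 'while True' loop, one fuel unit per iteration; fuel n.toNat is exactly the
-- number of iterations when 0 ≤ n (for n < 0 with n ≤ s the Python loop diverges — excluded by Pre_).
def solutionGo : Nat → Int → Int → List Int → List Int
  | 0, _, _, ans => ans
  | fuel + 1, n, s, ans =>
    if n = 0 then ans
    else
      let p := PySem.Int.floordiv s n
      solutionGo fuel (n - 1) (s - p) (ans ++ [p])

def solution (n : Int) (s : Int) : List Int :=
  if n > s then [-1]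
  else solutionGo n.toNat n s []

-- ===== PORT B =====
def solution_alt (n : Int) (s : Int) : List Int :=
  if n > s then [-1]
  else if n = 0 then []
  else
    let q := PySem.Int.floordiv s n
    let r := PySem.Int.mod s n
    List.replicate (n - r).toNat q ++ List.replicate r.toNat (q + 1)

-- ===== PRECONDITION & SPEC =====
-- Pre_ excludes n < 0 with n ≤ s, exactly the inputs on which A's while-loop never terminates.
def Pre_solution (n : Int) (s : Int) : Prop := 0 ≤ n ∨ s < n
instance (n : Int) (s : Int) : Decidable (Pre_solution n s) := by unfold Pre_solution; infer_instance
def pvWitness_solution : Int × Int := (3, 14)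

def Spec_solution (n : Int) (s : Int) (out : List Int) : Prop := out = solution_alt n s
instance (n : Int) (s : Int) (out : List Int) : Decidable (Spec_solution n s out) := by unfold Spec_solution; infer_instance

-- ===== CLAIM (what is proved, stated in full; the proofs are below) =====
def Claim_equal_solution : Prop := ∀ (n : Int) (s : Int), Dom_solution n s → Pre_solution n s → Spec_solution n s (solution n s)

-- ===== LEMMAS AND PROOFS =====

-- Invariant of A's loop: with m elements left and sum q*m + r (0 ≤ r < m), the loop
-- appends (m - r) copies of q then r copies of (q+1).
lemma solutionGo_closed (m : Nat) : ∀ (q r : Int) (ans : List Int), 0 ≤ r → r < m →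
    solutionGo m m (q * m + r) ans
      = ans ++ List.replicate (m - r.toNat) q ++ List.replicate r.toNat (q + 1) := by
  induction m with
  | zero => intro q r ans h0 h1; omega
  | succ k ih =>
    intro q r ans h0 h1
    have hm : (0:Int) < (k+1 : Nat) := by exact_mod_cast Nat.succ_pos k
    have hdiv : PySem.Int.floordiv (q * (k+1 : Nat) + r) ((k+1 : Nat) : Int) = q := by
      rw [PySem.Int.floordiv_eq_iff_of_pos hm]
      constructor <;> nlinarith
    simp only [solutionGo]
    rw [if_neg (by positivity), hdiv]
    have hs : q * ((k+1 : Nat) : Int) + r - q = q * (k : Nat) + r := by push_cast; ring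
    have hn : ((k+1 : Nat) : Int) - 1 = (k : Nat) := by push_cast; ring
    rw [hs, hn]
    by_cases hr : r < k
    · rw [ih q r (ans ++ [q]) h0 (by exact_mod_cast hr)]
      have hrk : r.toNat ≤ k := by omega
      have : (k + 1) - r.toNat = ((k - r.toNat) + 1) := by omega
      rw [this, List.replicate_succ]
      simp
    · -- r = k: remaining sum is (q+1)*k + 0
      have hrk : r = (k : Int) := by omega
      rcases Nat.eq_zero_or_pos k with hk | hk
      · subst hk
        have : r = 0 := by omega
        subst this
        simp [solutionGo]
      · have hsum : q * (k : Nat) + r = (q + 1) * (k : Nat) + 0 := by rw [hrk]; ring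
        rw [hsum, ih (q+1) 0 (ans ++ [q]) le_rfl (by exact_mod_cast hk)]
        have h2 : r.toNat = k := by omega
        have h1 : (k + 1) - r.toNat = 1 := by omega
        rw [h1, h2]
        simp

theorem solution_spec : Claim_equal_solution := by
  intro n s _ hpre
  unfold Spec_solution solution solution_alt
  by_cases hgt : n > s
  · simp [hgt]
  · rw [if_neg hgt, if_neg hgt]
    by_cases hn0 : n = 0
    · subst hn0; simp [solutionGo]
    · have hnpos : 0 < n := by rcases hpre with h | h <;> omega
      rw [if_neg hn0]
      have hq := PySem.Int.floordiv_mul_add_mod s n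
      have hr0 : 0 ≤ PySem.Int.mod s n := PySem.Int.mod_nonneg s hnpos
      have hrlt : PySem.Int.mod s n < n := PySem.Int.mod_lt s hnpos
      have hnt : ((n.toNat : Nat) : Int) = n := Int.toNat_of_nonneg (le_of_lt hnpos)
      have hs : s = PySem.Int.floordiv s n * ((n.toNat : Nat) : Int) + PySem.Int.mod s n := by
        rw [hnt]; linarith [hq]
      have key := solutionGo_closed n.toNat (PySem.Int.floordiv s n) (PySem.Int.mod s n) [] hr0 (by omega)
      rw [← hs, hnt] at key
      have hnr : (n - PySem.Int.mod s n).toNat = n.toNat - (PySem.Int.mod s n).toNat := by omega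
      simpa [hnr] using key
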